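-- pv_equiv track=rewrite | github.com/mirkru37/homework | Practice/task1.py | gen_comb
-- ===== SOURCE A (Python) =====
-- def gen_comb(arr, max_size, it, elements):
--     new_arr = []
--     if len(arr) != 0:
--         for i in range(0, len(arr)):
--             for j in elements:
--                 new_arr.append(arr[i] * 10 + j)
--     else:
--         new_arr = elements
--     if it < max_size - 1:
--         new_arr += gen_comb(new_arr, max_size, it + 1, elements)
--     return new_arr
-- ===== SOURCE B (Python) =====
-- def gen_comb(arr, max_size, it, elements):
--     # Iterative level-by-level generation (no recursion); performs the same
--     # single in-place extension of `elements` (when arr is empty) as the original.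
--     if len(arr) != 0:
--         result = [a * 10 + j for a in arr for j in elements]
--     else:
--         result = elements
--     tail = []
--     current = result
--     while it < max_size - 1:
--         current = [a * 10 + j for a in current for j in elements]
--         tail += current
--         it += 1
--     result += tail
--     return result
-- ===== Notes on version B (the rewrite author's own statement) =====
-- stated objective: simpler
-- what changed: Replaces A's recursion (each level spawning a recursive call whose result is concatenated on return) by a single iterative while-loop that generates the levels one after another into an accumulated tail, extending the result once at the end; the single in-place extension of `elements` when arr is empty is preserved.
import Mathlib
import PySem

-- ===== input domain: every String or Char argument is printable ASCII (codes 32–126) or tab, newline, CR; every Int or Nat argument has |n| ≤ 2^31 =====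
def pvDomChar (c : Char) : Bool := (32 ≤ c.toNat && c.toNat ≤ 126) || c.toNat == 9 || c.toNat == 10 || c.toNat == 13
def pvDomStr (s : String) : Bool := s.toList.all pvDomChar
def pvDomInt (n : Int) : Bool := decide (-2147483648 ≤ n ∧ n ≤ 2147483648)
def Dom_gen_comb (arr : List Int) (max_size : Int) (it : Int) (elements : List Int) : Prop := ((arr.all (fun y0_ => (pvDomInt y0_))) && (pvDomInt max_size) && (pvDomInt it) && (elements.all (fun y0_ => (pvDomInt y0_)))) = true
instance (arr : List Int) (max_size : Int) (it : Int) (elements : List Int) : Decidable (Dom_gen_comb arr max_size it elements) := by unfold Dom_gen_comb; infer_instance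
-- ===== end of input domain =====

-- B replaces A's recursion by an iterative level-by-level loop (objective: simpler, no recursion);
-- equivalence is about the RETURN value only — both Pythons extend `elements` in place once when arr is empty.

-- ===== PORT A =====
def gen_comb (arr : List Int) (max_size : Int) (it : Int) (elements : List Int) : List Int :=
  let new_arr : List Int :=
    if arr.length ≠ 0 then
      (PySem.List.pyRange 0 arr.length 1).foldl
        (fun acc i =>
          elements.foldl (fun acc2 j => acc2 ++ [PySem.List.pyGetD arr i 0 * 10 + j]) acc) []
    else elements
  if _h : it < max_size - 1 then
    new_arr ++ gen_comb new_arr max_size (it + 1) elements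
  else new_arr
termination_by (max_size - 1 - it).toNat
decreasing_by omega

-- ===== PORT B =====
def gen_comb_alt_loop (max_size : Int) (elements : List Int) (tail current : List Int) (it : Int) : List Int :=
  if _h : it < max_size - 1 then
    let current' := current.flatMap (fun a => elements.map (fun j => a * 10 + j))
    gen_comb_alt_loop max_size elements (tail ++ current') current' (it + 1)
  else tail
termination_by (max_size - 1 - it).toNat
decreasing_by omega

def gen_comb_alt (arr : List Int) (max_size : Int) (it : Int) (elements : List Int) : List Int :=
  let result : List Int :=
    if arr.length ≠ 0 then arr.flatMap (fun a => elements.map (fun j => a * 10 + j))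
    else elements
  result ++ gen_comb_alt_loop max_size elements [] result it

-- ===== PRECONDITION & SPEC =====
def Spec_gen_comb (arr : List Int) (max_size : Int) (it : Int) (elements : List Int) (out : List Int) : Prop := out = gen_comb_alt arr max_size it elements
instance (arr : List Int) (max_size : Int) (it : Int) (elements : List Int) (out : List Int) : Decidable (Spec_gen_comb arr max_size it elements out) := by unfold Spec_gen_comb; infer_instance

-- ===== CLAIM (what is proved, stated in full; the proofs are below) =====
def Claim_equal_gen_comb : Prop := ∀ (arr : List Int) (max_size : Int) (it : Int) (elements : List Int), Dom_gen_comb arr max_size it elements → Spec_gen_comb arr max_size it elements (gen_comb arr max_size it elements)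

-- ===== LEMMAS AND PROOFS =====

-- one level of generation ("cross product" arr x elements)
def pvCross (elements arr : List Int) : List Int :=
  arr.flatMap (fun a => elements.map (fun j => a * 10 + j))

-- A's inner loop over elements appends the mapped block
theorem foldl_inner_eq (elements : List Int) (a : Int) (acc : List Int) :
    elements.foldl (fun acc2 j => acc2 ++ [a * 10 + j]) acc
      = acc ++ elements.map (fun j => a * 10 + j) := by
  induction elements generalizing acc with
  | nil => simp
  | cons x xs ih => simp [List.foldl, ih]

theorem flatMap_range_getD (g : Int → List Int) (arr : List Int) :
    (List.range arr.length).flatMap (fun k => g (arr.getD k 0)) = arr.flatMap g := by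
  induction arr with
  | nil => simp
  | cons x xs ih =>
    simp only [List.length_cons, List.range_succ_eq_map, List.flatMap_cons,
      List.flatMap_map]
    simpa using congrArg (g x ++ ·) ih

-- A's double loop builds exactly pvCross
theorem new_arr_eq (arr elements : List Int) :
    (PySem.List.pyRange 0 arr.length 1).foldl
        (fun acc i =>
          elements.foldl (fun acc2 j => acc2 ++ [PySem.List.pyGetD arr i 0 * 10 + j]) acc) []
      = pvCross elements arr := by
  calc (PySem.List.pyRange 0 arr.length 1).foldl
        (fun acc i =>
          elements.foldl (fun acc2 j => acc2 ++ [PySem.List.pyGetD arr i 0 * 10 + j]) acc) []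
      = (PySem.List.pyRange 0 arr.length 1).foldl
        (fun acc i => acc ++ elements.map (fun j => PySem.List.pyGetD arr i 0 * 10 + j)) [] := by
        apply PySem.List.foldl_congr_mem
        intro acc i _
        exact foldl_inner_eq elements _ acc
    _ = pvCross elements arr := by
        rw [PySem.List.foldl_append_eq_flatMap, PySem.List.pyRange_zero_natCast]
        simp only [List.flatMap_map, PySem.List.pyGetD_natCast, List.nil_append]
        exact flatMap_range_getD (fun a => elements.map (fun j => a * 10 + j)) arr

-- A's first level (the value of new_arr)
def pvL1 (elements arr : List Int) : List Int :=
  if arr.length ≠ 0 then pvCross elements arr else elements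

theorem hL1_eq (arr elements : List Int) :
    (if arr.length ≠ 0 then
        (PySem.List.pyRange 0 arr.length 1).foldl
          (fun acc i =>
            elements.foldl (fun acc2 j => acc2 ++ [PySem.List.pyGetD arr i 0 * 10 + j]) acc) []
      else elements) = pvL1 elements arr := by
  unfold pvL1
  split_ifs with h
  · exact new_arr_eq arr elements
  · rfl

theorem pvL1_of_ne (elements l : List Int) (h : l ≠ []) :
    pvL1 elements l = pvCross elements l := by
  unfold pvL1
  rw [if_pos]
  simpa [List.length_eq_zero_iff] using h

theorem pvL1_nil_imp (elements arr : List Int) (h : pvL1 elements arr = []) :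
    elements = [] := by
  unfold pvL1 at h
  split_ifs at h with hl
  · cases arr with
    | nil => simp at hl
    | cons x xs =>
      unfold pvCross at h
      simp only [List.flatMap_cons, List.append_eq_nil_iff, List.map_eq_nil_iff] at h
      exact h.1
  · exact h

-- the loop returns its accumulated tail plus what it would return from an empty tail
theorem loop_eq_tail_append (max_size : Int) (elements : List Int) :
    ∀ (tail current : List Int) (it : Int),
      gen_comb_alt_loop max_size elements tail current it
        = tail ++ gen_comb_alt_loop max_size elements [] current it := by
  intro tail current it
  generalize hn : (max_size - 1 - it).toNat = n
  induction n generalizing tail current it with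
  | zero =>
    have hlt : ¬ it < max_size - 1 := by omega
    conv_lhs => rw [gen_comb_alt_loop]
    conv_rhs => rw [gen_comb_alt_loop]
    simp [hlt]
  | succ n ih =>
    conv_lhs => rw [gen_comb_alt_loop]
    conv_rhs => rw [gen_comb_alt_loop]
    by_cases hlt : it < max_size - 1
    · simp only [hlt, dif_pos]
      rw [ih (tail ++ _) _ (it + 1) (by omega),
          ih (([] : List Int) ++ _) _ (it + 1) (by omega)]
      simp [List.append_assoc]
    · simp [hlt]

theorem gen_comb_eq_loop (max_size : Int) (elements : List Int) :
    ∀ (arr : List Int) (it : Int),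
      gen_comb arr max_size it elements
        = pvL1 elements arr ++ gen_comb_alt_loop max_size elements [] (pvL1 elements arr) it := by
  intro arr it
  generalize hn : (max_size - 1 - it).toNat = n
  induction n generalizing arr it with
  | zero =>
    have hlt : ¬ it < max_size - 1 := by omega
    rw [gen_comb]
    conv_rhs => rw [gen_comb_alt_loop]
    simp only [hlt, dif_neg, not_false_eq_true, hL1_eq]
    simp
  | succ n ih =>
    rw [gen_comb]
    conv_rhs => rw [gen_comb_alt_loop]
    by_cases hlt : it < max_size - 1
    · simp only [hlt, dif_pos, hL1_eq]
      rw [ih (pvL1 elements arr) (it + 1) (by omega)]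
      rw [loop_eq_tail_append max_size elements
            (([] : List Int) ++
              List.flatMap (fun a => List.map (fun j => a * 10 + j) elements) (pvL1 elements arr))
            (List.flatMap (fun a => List.map (fun j => a * 10 + j) elements) (pvL1 elements arr))
            (it + 1)]
      simp only [List.nil_append]
      congr 1
      by_cases hnil : pvL1 elements arr = []
      · have hel : elements = [] := pvL1_nil_imp elements arr hnil
        rw [hnil]
        simp [pvL1, hel]
      · rw [pvL1_of_ne elements (pvL1 elements arr) hnil]
        rfl
    · simp only [hlt, dif_neg, not_false_eq_true, hL1_eq]
      simp

-- ===== VERDICT (by name: the statement is the Claim_ definition above) =====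
theorem gen_comb_spec : Claim_equal_gen_comb := by
  intro arr max_size it elements _
  unfold Spec_gen_comb gen_comb_alt
  rw [gen_comb_eq_loop max_size elements arr it]
  simp only [pvL1, pvCross]
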